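-- pv_equiv track=rewrite | github.com/PROGRESSIAGLOBALGROUP/Dashboard | tests/integration/test_tab_height_dom_simulation.py | _parse_css_block
-- ===== SOURCE A (Python) =====
-- from typing import Dict, List, Tuple
--
-- def _parse_css_block(css_text: str) -> Dict[str, str]:
--     """Parse CSS block into property dictionary"""
--     props = {}
--     for line in css_text.split(';'):
--         line = line.strip()
--         if ':' in line:
--             key, value = line.split(':', 1)
--             props[key.strip()] = value.strip()
--     return props
-- ===== SOURCE B (Python) =====
-- def _parse_css_block(css_text: str) -> dict:
--     """Parse CSS block into property dictionary (single-pass character state machine)."""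
--     props = {}
--     key, val, seen = [], [], False
--     for ch in css_text:
--         if ch == ';':
--             if seen:
--                 props[''.join(key).strip()] = ''.join(val).strip()
--             key, val, seen = [], [], False
--         elif ch == ':' and not seen:
--             seen = True
--         elif seen:
--             val.append(ch)
--         else:
--             key.append(ch)
--     if seen:
--         props[''.join(key).strip()] = ''.join(val).strip()
--     return props
-- ===== Notes on version B (the rewrite author's own statement) =====
-- stated objective: alternative
-- what changed: Replaced A's split-on-semicolon pass with per-segment strip and maxsplit-1 colon split by a single character-level state machine that accumulates key/value buffers and flushes at each semicolon (and at end of text), stripping only the finished pieces.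
import Mathlib
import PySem

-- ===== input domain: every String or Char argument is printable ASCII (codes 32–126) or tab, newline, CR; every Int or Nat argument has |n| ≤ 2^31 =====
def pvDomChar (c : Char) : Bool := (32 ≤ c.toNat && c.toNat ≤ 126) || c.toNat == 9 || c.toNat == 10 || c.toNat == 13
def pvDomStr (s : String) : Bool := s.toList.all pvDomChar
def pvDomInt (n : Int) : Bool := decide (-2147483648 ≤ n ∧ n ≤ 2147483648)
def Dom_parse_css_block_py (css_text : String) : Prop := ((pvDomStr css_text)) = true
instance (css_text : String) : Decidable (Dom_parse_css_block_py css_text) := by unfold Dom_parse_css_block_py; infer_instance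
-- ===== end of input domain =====

-- B replaces A's split-on-';' + per-segment split(':',1) passes with a single character-level
-- state machine over the text (objective: alternative single-pass algorithm, same O(n) cost).

-- ===== PORT A =====
-- loop body of A's 'for line in css_text.split(';')' as a named helper
def pcbALine (props : PySem.Dict String String) (line : String) : PySem.Dict String String :=
  let line := PySem.Str.strip line
  if PySem.Str.isIn ":" line then
    let parts := (PySem.Str.splitMax? line ":" 1).getD []
    props.insert (PySem.Str.strip (parts.getD 0 "")) (PySem.Str.strip (parts.getD 1 ""))
  else props

def parse_css_block_py (css_text : String) : List (String × String) :=
  (((PySem.Str.split? css_text ";").getD []).foldl pcbALine PySem.Dict.empty).items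

-- ===== PORT B =====
-- flush at a ';' or at end of text: record the pending declaration if a ':' was seen
def pcbFlush (props : PySem.Dict String String) (key val : List Char) (seen : Bool) :
    PySem.Dict String String :=
  if seen then
    props.insert (PySem.Str.strip (String.ofList key)) (PySem.Str.strip (String.ofList val))
  else props

-- one character of B's state machine: state = (props, key chars, value chars, colon seen)
def pcbStep (st : PySem.Dict String String × List Char × List Char × Bool) (ch : Char) :
    PySem.Dict String String × List Char × List Char × Bool :=
  match st with
  | (props, key, val, seen) =>
    if ch = ';' then (pcbFlush props key val seen, [], [], false)
    else if ch = ':' ∧ seen = false then (props, key, val, true)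
    else if seen then (props, key, val ++ [ch], seen)
    else (props, key ++ [ch], val, seen)

def parse_css_block_py_alt (css_text : String) : List (String × String) :=
  let st := css_text.toList.foldl pcbStep (PySem.Dict.empty, [], [], false)
  (pcbFlush st.1 st.2.1 st.2.2.1 st.2.2.2).items

-- ===== PRECONDITION & SPEC =====
def Spec_parse_css_block_py (css_text : String) (out : List (String × String)) : Prop := out = parse_css_block_py_alt css_text
instance (css_text : String) (out : List (String × String)) : Decidable (Spec_parse_css_block_py css_text out) := by unfold Spec_parse_css_block_py; infer_instance

-- ===== CLAIM (what is proved, stated in full; the proofs are below) =====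
def Claim_equal_parse_css_block_py : Prop := ∀ (css_text : String), Dom_parse_css_block_py css_text → Spec_parse_css_block_py css_text (parse_css_block_py css_text)

-- ===== LEMMAS AND PROOFS =====

-- prepend chars to the first piece of a split result
def consHead (pre : List Char) : List (List Char) → List (List Char)
  | [] => [pre]
  | s :: ss => (pre ++ s) :: ss

-- structural form of Python's split on a one-character separator
def mySplit (c : Char) : List Char → List (List Char)
  | [] => [[]]
  | ch :: rest => if ch = c then [] :: mySplit c rest else consHead [ch] (mySplit c rest)

-- structural form of split(sep, maxsplit) on a one-character separator
def mySplitMax (c : Char) : Nat → List Char → List (List Char)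
  | _, [] => [[]]
  | 0, l => [l]
  | m+1, ch :: rest =>
      if ch = c then [] :: mySplitMax c m rest else consHead [ch] (mySplitMax c (m+1) rest)

theorem consHead_ne_nil (pre : List Char) (ss : List (List Char)) : consHead pre ss ≠ [] := by
  cases ss <;> simp [consHead]

theorem mySplit_ne_nil (c : Char) (l : List Char) : mySplit c l ≠ [] := by
  cases l with
  | nil => simp [mySplit]
  | cons ch rest =>
    simp only [mySplit]
    split
    · simp
    · exact consHead_ne_nil _ _

theorem mySplitMax_ne_nil (c : Char) (m : Nat) (l : List Char) : mySplitMax c m l ≠ [] := by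
  cases l with
  | nil => cases m <;> simp [mySplitMax]
  | cons ch rest =>
    cases m with
    | zero => simp [mySplitMax]
    | succ m =>
      simp only [mySplitMax]
      split
      · simp
      · exact consHead_ne_nil _ _

theorem consHead_nil_of_ne (ss : List (List Char)) (h : ss ≠ []) : consHead [] ss = ss := by
  cases ss with
  | nil => exact absurd rfl h
  | cons s t => simp [consHead]

theorem go_eq (c : Char) : ∀ (fuel : Nat) (l : List Char), l.length < fuel →
    ∀ (cur : List Char) (acc : List (List Char)),
      PySem.Chars.splitOn.go [c] fuel l cur acc = acc.reverse ++ consHead cur.reverse (mySplit c l) := by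
  intro fuel
  induction fuel with
  | zero => intro l h; omega
  | succ n ih =>
    intro l h cur acc
    cases l with
    | nil =>
      rw [PySem.Chars.splitOn.go]
      · simp [mySplit, consHead]
      · omega
    | cons ch rest =>
      rw [PySem.Chars.splitOn.go]
      by_cases hch : ch = c
      · subst hch
        rw [if_pos (by simp [List.isPrefixOf])]
        simp only [List.length_cons] at h
        rw [show List.drop (List.length [ch]) (ch :: rest) = rest from rfl, ih rest (by omega)]
        simp only [mySplit, if_pos]
        rcases hne : mySplit ch rest with _ | ⟨s, ss⟩
        · exact absurd hne (mySplit_ne_nil ch rest)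
        · simp [consHead]
      · rw [if_neg (by simp [List.isPrefixOf, Ne.symm hch])]
        simp only [List.length_cons] at h
        rw [ih rest (by omega)]
        simp only [mySplit, if_neg hch]
        rcases mySplit c rest with _ | ⟨s, ss⟩ <;> simp [consHead]

theorem goMax_eq (c : Char) : ∀ (fuel : Nat) (l : List Char), l.length < fuel →
    ∀ (m : Nat) (cur : List Char) (acc : List (List Char)),
      PySem.Chars.splitOnMax.go [c] fuel m l cur acc = acc.reverse ++ consHead cur.reverse (mySplitMax c m l) := by
  intro fuel
  induction fuel with
  | zero => intro l h; omega
  | succ n ih =>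
    intro l h m cur acc
    cases l with
    | nil =>
      rw [PySem.Chars.splitOnMax.go]
      · cases m <;> simp [mySplitMax, consHead]
      · omega
    | cons ch rest =>
      rw [PySem.Chars.splitOnMax.go]
      cases m with
      | zero => simp [mySplitMax, consHead]
      | succ m' =>
        rw [if_neg (by omega)]
        by_cases hch : ch = c
        · subst hch
          rw [if_pos (by simp [List.isPrefixOf])]
          simp only [List.length_cons] at h
          rw [show List.drop (List.length [ch]) (ch :: rest) = rest from rfl, ih rest (by omega)]
          simp only [mySplitMax, if_pos, Nat.add_sub_cancel]
          rcases hne : mySplitMax ch m' rest with _ | ⟨s, ss⟩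
          · exact absurd hne (mySplitMax_ne_nil ch m' rest)
          · simp [consHead]
        · rw [if_neg (by simp [List.isPrefixOf, Ne.symm hch])]
          simp only [List.length_cons] at h
          rw [ih rest (by omega)]
          simp only [mySplitMax, if_neg hch]
          rcases mySplitMax c (m' + 1) rest with _ | ⟨s, ss⟩ <;> simp [consHead]

theorem splitOn_eq_mySplit (c : Char) (l : List Char) :
    PySem.Chars.splitOn l [c] = mySplit c l := by
  unfold PySem.Chars.splitOn
  rw [go_eq c (l.length + 1) l (by omega) [] []]
  simp [consHead_nil_of_ne _ (mySplit_ne_nil c l)]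

theorem splitOnMax_one_eq (c : Char) (l : List Char) :
    PySem.Chars.splitOnMax l [c] 1 = mySplitMax c 1 l := by
  unfold PySem.Chars.splitOnMax
  norm_num
  rw [goMax_eq c (l.length + 1) l (by omega) 1 [] []]
  simp [consHead_nil_of_ne _ (mySplitMax_ne_nil c 1 l)]

theorem mySplit_of_not_mem (c : Char) (l : List Char) (h : c ∉ l) : mySplit c l = [l] := by
  induction l with
  | nil => rfl
  | cons ch rest ih =>
    simp only [List.mem_cons, not_or] at h
    simp [mySplit, Ne.symm h.1, ih h.2, consHead]

theorem mySplit_append (c : Char) (p q : List Char) (h : c ∉ p) :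
    mySplit c (p ++ c :: q) = p :: mySplit c q := by
  induction p with
  | nil => simp [mySplit]
  | cons a p' ih =>
    simp only [List.mem_cons, not_or] at h
    simp [mySplit, Ne.symm h.1, ih h.2, consHead]

theorem mySplitMax_zero (c : Char) (l : List Char) : mySplitMax c 0 l = [l] := by
  cases l <;> rfl

theorem mySplitMax_one_append (c : Char) (p q : List Char) (h : c ∉ p) :
    mySplitMax c 1 (p ++ c :: q) = [p, q] := by
  induction p with
  | nil => simp [mySplitMax, mySplitMax_zero]
  | cons a p' ih =>
    simp only [List.mem_cons, not_or] at h
    simp [mySplitMax, Ne.symm h.1, ih h.2, consHead]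

theorem first_occ (c : Char) (l : List Char) (h : c ∈ l) :
    ∃ p q, l = p ++ c :: q ∧ c ∉ p := by
  induction l with
  | nil => cases h
  | cons a t ih =>
    by_cases ha : a = c
    · exact ⟨[], t, by simp [ha], by simp⟩
    · have h' : c ∈ t := by
        rcases List.mem_cons.mp h with h1 | h1
        · exact absurd h1.symm ha
        · exact h1
      rcases ih h' with ⟨p, q, hpq, hnp⟩
      exact ⟨a :: p, q, by simp [hpq], by simp [hnp, Ne.symm ha]⟩

-- ---- strip lemmas ----

theorem lstrip_append_cons (c : Char) (p q : List Char) (hc : PySem.Chars.isspace c = false) :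
    PySem.Chars.lstrip (p ++ c :: q) = PySem.Chars.lstrip p ++ c :: q := by
  induction p with
  | nil => simp [PySem.Chars.lstrip, hc]
  | cons a p' ih =>
    simp only [PySem.Chars.lstrip, List.cons_append, List.dropWhile_cons] at *
    split <;> simp_all

theorem rstrip_append_cons (c : Char) (p q : List Char) (hc : PySem.Chars.isspace c = false) :
    PySem.Chars.rstrip (p ++ c :: q) = p ++ c :: PySem.Chars.rstrip q := by
  show (List.dropWhile _ (p ++ c :: q).reverse).reverse = _
  have : (p ++ c :: q).reverse = q.reverse ++ c :: p.reverse := by simp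
  rw [this]
  have := lstrip_append_cons c q.reverse p.reverse hc
  simp only [PySem.Chars.lstrip] at this
  rw [this]
  simp [PySem.Chars.rstrip]

theorem mem_of_mem_lstrip {c : Char} {l : List Char} (h : c ∈ PySem.Chars.lstrip l) : c ∈ l :=
  (List.dropWhile_sublist _).mem h

theorem mem_of_mem_rstrip {c : Char} {l : List Char} (h : c ∈ PySem.Chars.rstrip l) : c ∈ l := by
  simp only [PySem.Chars.rstrip, List.mem_reverse] at h
  exact List.mem_reverse.mp ((List.dropWhile_sublist _).mem h)

theorem mem_of_mem_strip {c : Char} {l : List Char} (h : c ∈ PySem.Chars.strip l) : c ∈ l :=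
  mem_of_mem_lstrip (mem_of_mem_rstrip h)

theorem lstrip_idem (l : List Char) :
    PySem.Chars.lstrip (PySem.Chars.lstrip l) = PySem.Chars.lstrip l :=
  List.dropWhile_idempotent _ _

theorem rstrip_idem (l : List Char) :
    PySem.Chars.rstrip (PySem.Chars.rstrip l) = PySem.Chars.rstrip l := by
  simp [PySem.Chars.rstrip, List.dropWhile_idempotent]

theorem dropWhile_head_false (p : Char → Bool) (l : List Char) (c : Char) (q : List Char)
    (h : List.dropWhile p l = c :: q) : p c = false := by
  induction l with
  | nil => simp at h
  | cons a t ih =>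
    rw [List.dropWhile_cons] at h
    split at h
    · exact ih h
    · cases h
      simp_all

theorem lstrip_rstrip_comm (l : List Char) :
    PySem.Chars.lstrip (PySem.Chars.rstrip l) = PySem.Chars.rstrip (PySem.Chars.lstrip l) := by
  by_cases h : PySem.Chars.lstrip l = []
  · have hall : ∀ x ∈ l, PySem.Chars.isspace x = true := by
      simpa [PySem.Chars.lstrip, List.dropWhile_eq_nil_iff] using h
    have hr : PySem.Chars.rstrip l = [] := by
      simp only [PySem.Chars.rstrip, List.reverse_eq_nil_iff, List.dropWhile_eq_nil_iff]
      intro x hx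
      exact hall x (List.mem_reverse.mp hx)
    rw [h, hr]
    rfl
  · rcases hcons : PySem.Chars.lstrip l with _ | ⟨c, q₂⟩
    · exact absurd hcons h
    · have hc : PySem.Chars.isspace c = false :=
        dropWhile_head_false _ l c q₂ hcons
    
      have hl : l = List.takeWhile PySem.Chars.isspace l ++ c :: q₂ := by
        conv_lhs => rw [← List.takeWhile_append_dropWhile (p := PySem.Chars.isspace) (l := l)]
        rw [show List.dropWhile PySem.Chars.isspace l = c :: q₂ from hcons]
      have htw : PySem.Chars.lstrip (List.takeWhile PySem.Chars.isspace l) = [] := by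
        simp only [PySem.Chars.lstrip, List.dropWhile_eq_nil_iff]
        exact fun x hx => List.mem_takeWhile_imp hx
      calc PySem.Chars.lstrip (PySem.Chars.rstrip l)
          = PySem.Chars.lstrip (PySem.Chars.rstrip (List.takeWhile PySem.Chars.isspace l ++ c :: q₂)) := by rw [← hl]
        _ = PySem.Chars.lstrip (List.takeWhile PySem.Chars.isspace l ++ c :: PySem.Chars.rstrip q₂) := by
              rw [rstrip_append_cons c _ _ hc]
        _ = PySem.Chars.lstrip (List.takeWhile PySem.Chars.isspace l) ++ c :: PySem.Chars.rstrip q₂ := by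
              rw [lstrip_append_cons c _ _ hc]
        _ = c :: PySem.Chars.rstrip q₂ := by rw [htw]; rfl
        _ = PySem.Chars.rstrip (c :: q₂) := by
              have h2 := rstrip_append_cons c [] q₂ hc
              simp only [List.nil_append] at h2
              rw [h2]

theorem strip_lstrip (l : List Char) :
    PySem.Chars.strip (PySem.Chars.lstrip l) = PySem.Chars.strip l := by
  simp [PySem.Chars.strip, lstrip_idem]

theorem strip_rstrip (l : List Char) :
    PySem.Chars.strip (PySem.Chars.rstrip l) = PySem.Chars.strip l := by
  simp only [PySem.Chars.strip]
  rw [lstrip_rstrip_comm, rstrip_idem]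

theorem strip_append_cons (c : Char) (p q : List Char) (hc : PySem.Chars.isspace c = false) :
    PySem.Chars.strip (p ++ c :: q) =
      PySem.Chars.lstrip p ++ c :: PySem.Chars.rstrip q := by
  simp only [PySem.Chars.strip]
  rw [lstrip_append_cons c p q hc, rstrip_append_cons c (PySem.Chars.lstrip p) q hc]

-- ---- machine lemmas ----

theorem foldl_step_seen (s : List Char) (hs : ';' ∉ s) :
    ∀ (d : PySem.Dict String String) (key val : List Char),
      s.foldl pcbStep (d, key, val, true) = (d, key, val ++ s, true) := by
  induction s with
  | nil => simp
  | cons ch rest ih =>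
    intro d key val
    simp only [List.mem_cons, not_or] at hs
    simp [List.foldl_cons, pcbStep, Ne.symm hs.1, ih hs.2]

theorem foldl_step_nokey (s : List Char) (hs : ';' ∉ s) (hc : ':' ∉ s) :
    ∀ (d : PySem.Dict String String) (key val : List Char),
      s.foldl pcbStep (d, key, val, false) = (d, key ++ s, val, false) := by
  induction s with
  | nil => simp
  | cons ch rest ih =>
    intro d key val
    simp only [List.mem_cons, not_or] at hs hc
    simp [List.foldl_cons, pcbStep, Ne.symm hs.1, Ne.symm hc.1, ih hs.2 hc.2]

theorem foldl_step_colon (p q : List Char) (hp : ';' ∉ p) (hc : ':' ∉ p) (hq : ';' ∉ q)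
    (d : PySem.Dict String String) :
    (p ++ ':' :: q).foldl pcbStep (d, [], [], false) = (d, p, q, true) := by
  rw [List.foldl_append, foldl_step_nokey p hp hc, List.foldl_cons,
    show pcbStep (d, [] ++ p, [], false) ':' = (d, [] ++ p, [], true) by simp [pcbStep, show ¬(':' : Char) = ';' from by decide],
    foldl_step_seen q hq]
  simp

-- B's per-segment result, as a function of the segment
def bSeg (d : PySem.Dict String String) (s : List Char) : PySem.Dict String String :=
  let st := s.foldl pcbStep (d, [], [], false)
  pcbFlush st.1 st.2.1 st.2.2.1 st.2.2.2

theorem pcbStep_semi (st : PySem.Dict String String × List Char × List Char × Bool) :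
    pcbStep st ';' = (pcbFlush st.1 st.2.1 st.2.2.1 st.2.2.2, [], [], false) := by
  obtain ⟨d, key, val, seen⟩ := st
  simp [pcbStep]

-- A's loop body on a segment (as a char list) equals B's per-segment machine result
theorem seg_eq (s : List Char) (hs : ';' ∉ s) (d : PySem.Dict String String) :
    pcbALine d (String.ofList s) = bSeg d s := by
  have hsc : PySem.Chars.isspace ':' = false := by decide
  by_cases hm : ':' ∈ s
  · obtain ⟨p, q, rfl, hcp⟩ := first_occ ':' s hm
    have hsp : ';' ∉ p := fun hx => hs (by simp [hx])
    have hsq : ';' ∉ q := fun hx => hs (by simp [hx])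
    -- B side
    have hB : bSeg d (p ++ ':' :: q) =
        d.insert (String.ofList (PySem.Chars.strip p)) (String.ofList (PySem.Chars.strip q)) := by
      unfold bSeg
      rw [foldl_step_colon p q hsp hcp hsq]
      simp [pcbFlush, PySem.Str.strip]
    rw [hB]
    -- A side
    unfold pcbALine
    have hstrip : PySem.Str.strip (String.ofList (p ++ ':' :: q)) =
        String.ofList (PySem.Chars.lstrip p ++ ':' :: PySem.Chars.rstrip q) := by
      simp [PySem.Str.strip, strip_append_cons ':' p q hsc]
    rw [hstrip]
    have hIn : PySem.Str.isIn ":" (String.ofList (PySem.Chars.lstrip p ++ ':' :: PySem.Chars.rstrip q)) = true := by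
      rw [PySem.Str.isIn_iff_infix]
      simp only [String.toList_ofList, show (":" : String).toList = [':'] from by decide]
      rw [List.singleton_infix_iff]
      simp
    rw [if_pos hIn]
    have hncp : ':' ∉ PySem.Chars.lstrip p := fun hx => hcp (mem_of_mem_lstrip hx)
    have hparts : PySem.Str.splitMax? (String.ofList (PySem.Chars.lstrip p ++ ':' :: PySem.Chars.rstrip q)) ":" 1 =
        some [String.ofList (PySem.Chars.lstrip p), String.ofList (PySem.Chars.rstrip q)] := by
      simp only [PySem.Str.splitMax?, String.toList_ofList, show (":" : String).toList = [':'] from by decide]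
      rw [show PySem.Chars.splitMax? (PySem.Chars.lstrip p ++ ':' :: PySem.Chars.rstrip q) [':'] 1 =
            some (PySem.Chars.splitOnMax (PySem.Chars.lstrip p ++ ':' :: PySem.Chars.rstrip q) [':'] 1) from rfl]
      rw [splitOnMax_one_eq, mySplitMax_one_append ':' _ _ hncp]
      rfl
    rw [hparts]
    simp only [Option.getD_some, List.getD_cons_zero, List.getD_cons_succ]
    have h1 : PySem.Str.strip (String.ofList (PySem.Chars.lstrip p)) = String.ofList (PySem.Chars.strip p) := by
      simp [PySem.Str.strip, strip_lstrip]
    have h2 : PySem.Str.strip (String.ofList (PySem.Chars.rstrip q)) = String.ofList (PySem.Chars.strip q) := by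
      simp [PySem.Str.strip, strip_rstrip]
    rw [h1, h2]
  · -- no colon in the segment: both sides leave the dict unchanged
    have hA : PySem.Chars.isIn [':'] (PySem.Chars.strip s) = false := by
      rw [PySem.Chars.isIn_eq_false_iff, List.singleton_infix_iff]
      exact fun hx => hm (mem_of_mem_strip hx)
    unfold pcbALine
    rw [if_neg (by simp [hA])]
    unfold bSeg
    rw [foldl_step_nokey s hs hm]
    simp [pcbFlush]

-- the whole machine equals A's fold over the split segments
theorem main_eq : ∀ (n : Nat) (cs : List Char), cs.length ≤ n → ∀ (d : PySem.Dict String String),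
    ((mySplit ';' cs).map String.ofList).foldl pcbALine d =
      bSeg d cs := by
  intro n
  induction n with
  | zero =>
    intro cs h d
    have hnil : cs = [] := List.eq_nil_of_length_eq_zero (by omega)
    subst hnil
    exact seg_eq [] (by simp) d
  | succ n ih =>
    intro cs h d
    by_cases hm : ';' ∈ cs
    · obtain ⟨p, q, rfl, hp⟩ := first_occ ';' cs hm
      rw [mySplit_append ';' p q hp]
      simp only [List.map_cons, List.foldl_cons]
      rw [seg_eq p hp d, ih q (by simp at h; omega)]
      unfold bSeg
      rw [List.foldl_append, List.foldl_cons, pcbStep_semi]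
    · rw [mySplit_of_not_mem ';' cs hm]
      simp only [List.map_cons, List.map_nil, List.foldl_cons, List.foldl_nil]
      exact seg_eq cs hm d

-- ===== VERDICT (by name: the statement is the Claim_ definition above) =====
theorem parse_css_block_py_spec : Claim_equal_parse_css_block_py := by
  intro css_text _
  unfold Spec_parse_css_block_py parse_css_block_py parse_css_block_py_alt
  have hsplit : (PySem.Str.split? css_text ";").getD [] =
      (mySplit ';' css_text.toList).map String.ofList := by
    simp only [PySem.Str.split?, PySem.Chars.split?,
      show (";" : String).toList = [';'] from by decide]
    rw [if_neg (by decide)]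
    simp [splitOn_eq_mySplit]
  rw [hsplit]
  have h := main_eq css_text.toList.length css_text.toList le_rfl PySem.Dict.empty
  rw [h]
  have hofs : String.ofList css_text.toList = css_text := by
    simp
  rfl
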